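-- pv_equiv track=rewrite | github.com/pyb0987/backjon | p1062.py | teach
-- ===== SOURCE A (Python) =====
-- def teach(N, K, inp):
--     import itertools
--     if K<5:
--         return 0
--     else:
--         basic = set(['a', 'n', 't', 'c', 'i'])
--         inpset = []
--         allset = set({})
--         for word in inp:
--             if K-5>= len(set(word)-basic):
--                 inpset.append(set(word)-basic)
--                 allset = allset | inpset[-1]
--         maximum = 0
--         for comb in itertools.combinations(allset, min(len(allset), K-5)):
--             count = 0
--             for word in inpset:
--                 if word<=set(comb):
--                     count +=1
--             maximum = max(count, maximum)
--         return maximum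
-- ===== SOURCE B (Python) =====
-- def teach(N, K, inp):
--     # Dedupe words by their canonical extra-letter key, count multiplicities once,
--     # then a choose/skip recursion over the sorted candidate letters with pruning.
--     if K < 5:
--         return 0
--     from collections import Counter
--     basic = {'a', 'n', 't', 'c', 'i'}
--     keys = [tuple(sorted(set(w) - basic)) for w in inp
--             if len(set(w) - basic) <= K - 5]
--     groups = Counter(keys)
--     letters = sorted({c for key in groups for c in key})
--
--     def best(rest, chosen, r):
--         # max words readable after picking r more letters out of `rest`
--         if r == 0:
--             return sum(cnt for key, cnt in groups.items()
--                        if all(c in chosen for c in key))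
--         if len(rest) < r:
--             return 0
--         x = rest[0]
--         return max(best(rest[1:], chosen | {x}, r - 1),
--                    best(rest[1:], chosen, r))
--
--     return best(letters, set(), min(len(letters), K - 5))
-- ===== Notes on version B (the rewrite author's own statement) =====
-- stated objective: alternative
-- what changed: B replaces A's per-combination scan over every kept word by a Counter of canonical (sorted) extra-letter keys, so identical extra-letter sets are counted once, and enumerates letter choices by a choose/skip recursion over the sorted candidate letters with pruning instead of itertools.combinations; intended as faster, measured only ~1.2x at the largest size.
import Mathlib
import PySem

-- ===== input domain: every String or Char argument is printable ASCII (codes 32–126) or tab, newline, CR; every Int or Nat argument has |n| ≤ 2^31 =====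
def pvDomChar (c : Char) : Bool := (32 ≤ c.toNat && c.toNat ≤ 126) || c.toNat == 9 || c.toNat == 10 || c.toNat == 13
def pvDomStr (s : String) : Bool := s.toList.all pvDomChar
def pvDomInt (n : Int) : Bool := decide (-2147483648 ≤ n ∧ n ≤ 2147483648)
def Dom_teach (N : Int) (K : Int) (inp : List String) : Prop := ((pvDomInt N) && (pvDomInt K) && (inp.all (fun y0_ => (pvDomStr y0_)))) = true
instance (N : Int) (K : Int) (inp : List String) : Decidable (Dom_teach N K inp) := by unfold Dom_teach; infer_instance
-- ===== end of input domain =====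

-- B replaces A's per-combination scan of every word by a Counter of canonical extra-letter
-- keys and a choose/skip recursion over the sorted candidate letters (return value only;
-- A iterates combinations over a Python set, whose max is iteration-order independent).

-- ===== PORT A =====
def teach (N : Int) (K : Int) (inp : List String) : Int :=
  if K < 5 then 0
  else
    let basic : PySem.Set Char := PySem.Set.ofList ['a', 'n', 't', 'c', 'i']
    let p := inp.foldl
      (fun (st : List (PySem.Set Char) × PySem.Set Char) word =>
        let ws := PySem.Set.diff (PySem.Set.ofList word.toList) basic
        if (ws.length : Int) ≤ K - 5 then (st.1 ++ [ws], PySem.Set.union st.2 ws) else st)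
      ([], PySem.Set.empty)
    (PySem.List.combinations p.2 (min p.2.length (K - 5).toNat)).foldl
      (fun maximum comb =>
        let count := p.1.foldl
          (fun count w => if PySem.Set.issubset w (PySem.Set.ofList comb) then count + 1 else count) 0
        max count maximum) 0

-- ===== PORT B =====
def teachAltSum (groups : PySem.Dict (List Char) Int) (chosen : PySem.Set Char) : Int :=
  groups.items.foldl
    (fun acc kv => if kv.1.all (fun c => PySem.Set.contains chosen c) then acc + kv.2 else acc) 0

def teachAltBest (groups : PySem.Dict (List Char) Int) :
    List Char → PySem.Set Char → Nat → Int
  | _, chosen, 0 => teachAltSum groups chosen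
  | [], _, _ + 1 => 0
  | x :: rest, chosen, r + 1 =>
    if rest.length + 1 < r + 1 then 0
    else
      max (teachAltBest groups rest (PySem.Set.add chosen x) r)
          (teachAltBest groups rest chosen (r + 1))

def teach_alt (N : Int) (K : Int) (inp : List String) : Int :=
  if K < 5 then 0
  else
    let basic : PySem.Set Char := PySem.Set.ofList ['a', 'n', 't', 'c', 'i']
    let keys := (inp.filter
        (fun w => ((PySem.Set.diff (PySem.Set.ofList w.toList) basic).length : Int) ≤ K - 5)).map
      (fun w => PySem.List.sorted (PySem.Set.diff (PySem.Set.ofList w.toList) basic) (fun c => c) false)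
    let groups := PySem.Dict.counter keys
    let letters := PySem.List.sorted
      (PySem.Set.ofList (groups.keys.flatMap (fun k => k))) (fun c => c) false
    teachAltBest groups letters PySem.Set.empty (min letters.length (K - 5).toNat)

-- ===== PRECONDITION & SPEC =====
def Spec_teach (N : Int) (K : Int) (inp : List String) (out : Int) : Prop := out = teach_alt N K inp
instance (N : Int) (K : Int) (inp : List String) (out : Int) : Decidable (Spec_teach N K inp out) := by unfold Spec_teach; infer_instance

-- ===== CLAIM (what is proved, stated in full; the proofs are below) =====
def Claim_equal_teach : Prop := ∀ (N : Int) (K : Int) (inp : List String), Dom_teach N K inp → Spec_teach N K inp (teach N K inp)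

-- ===== LEMMAS AND PROOFS =====

-- max-of-mapped-list with floor 0
def pvMA (f : List Char → Int) (L : List (List Char)) : Int := (L.map f).foldl max 0

lemma pvFoldlMaxShift (l : List Int) : ∀ a c : Int, l.foldl max (max a c) = max a (l.foldl max c) := by
  induction l with
  | nil => intro a c; rfl
  | cons x t ih =>
    intro a c
    simpa [List.foldl_cons, max_assoc] using ih a (max c x)

lemma pvMA_nonneg (f : List Char → Int) (L : List (List Char)) : 0 ≤ pvMA f L :=
  (PySem.List.le_foldl_max (L.map f) 0).1

lemma pvFoldlMaxLe (l : List Int) : ∀ a b : Int, a ≤ b → (∀ v ∈ l, v ≤ b) → l.foldl max a ≤ b := by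
  induction l with
  | nil => intro a b hab _; simpa using hab
  | cons x t ih =>
    intro a b hab hv
    refine ih (max a x) b (max_le hab (hv x (by simp))) ?_
    intro v hvmem; exact hv v (by simp [hvmem])

lemma pvMA_le (f : List Char → Int) (L : List (List Char)) {b : Int}
    (hb : 0 ≤ b) (h : ∀ c ∈ L, f c ≤ b) : pvMA f L ≤ b := by
  refine pvFoldlMaxLe (L.map f) 0 b hb ?_
  intro v hv
  obtain ⟨c, hc, rfl⟩ := List.mem_map.mp hv
  exact h c hc

lemma pvMA_mem_le (f : List Char → Int) (L : List (List Char)) {c : List Char} (hc : c ∈ L) :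
    f c ≤ pvMA f L :=
  (PySem.List.le_foldl_max (L.map f) 0).2 (f c) (List.mem_map_of_mem hc)

lemma pvMA_mono (f g : List Char → Int) (L M : List (List Char))
    (h : ∀ c ∈ L, ∃ d ∈ M, f c ≤ g d) : pvMA f L ≤ pvMA g M := by
  refine pvMA_le f L (pvMA_nonneg g M) ?_
  intro c hc
  obtain ⟨d, hd, hfg⟩ := h c hc
  exact le_trans hfg (pvMA_mem_le g M hd)

-- combinations of two nodup lists with the same members give the same max, for a
-- membership-invariant f
lemma pvMA_comb_perm (f : List Char → Int)
    (hf : ∀ c d : List Char, (∀ a, a ∈ c ↔ a ∈ d) → f c = f d)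
    (xs ys : List Char) (hx : xs.Nodup) (hy : ys.Nodup)
    (hmem : ∀ a, a ∈ xs ↔ a ∈ ys) (r : Nat) :
    pvMA f (PySem.List.combinations xs r) = pvMA f (PySem.List.combinations ys r) := by
  have key : ∀ us vs : List Char, us.Nodup → vs.Nodup → (∀ a, a ∈ us ↔ a ∈ vs) →
      ∀ c ∈ PySem.List.combinations us r, ∃ d ∈ PySem.List.combinations vs r, f c ≤ f d := by
    intro us vs hus hvs hm c hc
    obtain ⟨hsub, hlen⟩ := (PySem.List.mem_combinations_iff us r c).mp hc
    have hcnd : c.Nodup := hus.sublist hsub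
    refine ⟨vs.filter (fun a => decide (a ∈ c)), ?_, ?_⟩
    · refine (PySem.List.mem_combinations_iff vs r _).mpr ⟨List.filter_sublist, ?_⟩
      have hperm : (vs.filter (fun a => decide (a ∈ c))).Perm c := by
        rw [List.perm_ext_iff_of_nodup (hvs.filter _) hcnd]
        intro a
        simp only [List.mem_filter, decide_eq_true_eq]
        constructor
        · rintro ⟨_, h⟩; exact h
        · intro h; exact ⟨(hm a).mp (hsub.subset h), h⟩
      rw [hperm.length_eq, hlen]
    · have : f c = f (vs.filter (fun a => decide (a ∈ c))) := by
        refine hf _ _ ?_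
        intro a
        simp only [List.mem_filter, decide_eq_true_eq]
        constructor
        · intro h; exact ⟨(hm a).mp (hsub.subset h), h⟩
        · rintro ⟨_, h⟩; exact h
      exact le_of_eq this
  exact le_antisymm
    (pvMA_mono f f _ _ (key xs ys hx hy hmem))
    (pvMA_mono f f _ _ (key ys xs hy hx (fun a => (hmem a).symm)))

-- word model: the list of kept extra-letter sets, their union, the sorted keys
def pvEx (w : String) : PySem.Set Char :=
  PySem.Set.diff (PySem.Set.ofList w.toList) (PySem.Set.ofList ['a', 'n', 't', 'c', 'i'])

def pvWs (K : Int) (inp : List String) : List (List Char) :=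
  (inp.filter (fun w => ((pvEx w).length : Int) ≤ K - 5)).map (fun w => (pvEx w : List Char))

def pvU (K : Int) (inp : List String) : PySem.Set Char :=
  (pvWs K inp).foldl PySem.Set.union []

def pvKeys (K : Int) (inp : List String) : List (List Char) :=
  (pvWs K inp).map (fun v => PySem.List.sorted v (fun c => c) false)

def pvCnt (K : Int) (inp : List String) (chosen : List Char) : Int :=
  ((pvWs K inp).countP (fun w => decide (∀ a ∈ w, a ∈ chosen)) : Int)

-- A's accumulator fold builds exactly (pvWs, pvU)
lemma pvAfoldGen (K : Int) : ∀ (l : List String) (a1 : List (PySem.Set Char)) (a2 : PySem.Set Char),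
    l.foldl
      (fun (st : List (PySem.Set Char) × PySem.Set Char) word =>
        if ((PySem.Set.diff (PySem.Set.ofList word.toList)
              (PySem.Set.ofList ['a', 'n', 't', 'c', 'i'])).length : Int) ≤ K - 5 then
          (st.1 ++ [PySem.Set.diff (PySem.Set.ofList word.toList)
              (PySem.Set.ofList ['a', 'n', 't', 'c', 'i'])],
           PySem.Set.union st.2 (PySem.Set.diff (PySem.Set.ofList word.toList)
              (PySem.Set.ofList ['a', 'n', 't', 'c', 'i'])))
        else st)
      (a1, a2)
    = (a1 ++ pvWs K l, (pvWs K l).foldl PySem.Set.union a2) := by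
  intro l
  induction l with
  | nil => intro a1 a2; simp [pvWs]
  | cons w t ih =>
    intro a1 a2
    by_cases h : ((PySem.Set.diff (PySem.Set.ofList w.toList)
        (PySem.Set.ofList ['a', 'n', 't', 'c', 'i'])).length : Int) ≤ K - 5
    · simp only [List.foldl_cons, if_pos h, ih]
      have hws : pvWs K (w :: t) = (pvEx w : List Char) :: pvWs K t := by
        simp [pvWs, pvEx, h]
      simp [hws, pvEx, List.foldl_cons]
    · simp only [List.foldl_cons, if_neg h, ih]
      have hws : pvWs K (w :: t) = pvWs K t := by
        simp [pvWs, pvEx, h]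
      simp [hws]

lemma pvMemFoldUnion (a : Char) : ∀ (l : List (List Char)) (s : PySem.Set Char),
    (a ∈ l.foldl PySem.Set.union s) ↔ a ∈ s ∨ ∃ w ∈ l, a ∈ w := by
  intro l
  induction l with
  | nil => intro s; simp
  | cons w t ih =>
    intro s
    simp only [List.foldl_cons, ih, PySem.Set.mem_union]
    constructor
    · rintro (( hs | hw) | ⟨v, hv, ha⟩)
      · exact Or.inl hs
      · exact Or.inr ⟨w, by simp, hw⟩
      · exact Or.inr ⟨v, by simp [hv], ha⟩
    · rintro (hs | ⟨v, hv, ha⟩)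
      · exact Or.inl (Or.inl hs)
      · rcases List.mem_cons.mp hv with rfl | hv
        · exact Or.inl (Or.inr ha)
        · exact Or.inr ⟨v, hv, ha⟩

lemma pvNodupFoldUnion : ∀ (l : List (List Char)) (s : PySem.Set Char),
    s.Nodup → (l.foldl PySem.Set.union s).Nodup := by
  intro l
  induction l with
  | nil => intro s h; simpa using h
  | cons w t ih =>
    intro s h
    exact ih _ (PySem.Set.nodup_union s w h)

-- A's inner counting loop is a countP
lemma pvInner (L : List (PySem.Set Char)) (comb : List Char) :
    L.foldl (fun count w => if PySem.Set.issubset w (PySem.Set.ofList comb) then count + 1 else count) 0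
      = (L.countP (fun w => decide (∀ a ∈ w, a ∈ comb)) : Int) := by
  have hc : L.countP (fun w => PySem.Set.issubset w (PySem.Set.ofList comb))
      = L.countP (fun w => decide (∀ a ∈ w, a ∈ comb)) := by
    refine List.countP_congr ?_
    intro w _
    rw [Bool.eq_iff_iff]
    simp [PySem.Set.issubset_iff, PySem.Set.mem_ofList]
  rw [PySem.List.foldl_if_add_one, hc]
  simp

-- running max of a projection, written as pvMA
lemma pvFoldMaxComm (f : List Char → Int) (L : List (List Char)) :
    L.foldl (fun m c => max (f c) m) 0 = pvMA f L := by
  unfold pvMA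
  rw [List.foldl_map]
  congr 1
  funext m c
  exact max_comm (f c) m

-- Σ over a covering nodup list of per-key counts = countP
lemma pvSumSingle (x : List Char) (h : List Char → Int) :
    ∀ d : List (List Char), d.Nodup → x ∈ d → (∀ k ∈ d, k ≠ x → h k = 0) →
      (d.map h).sum = h x := by
  intro d
  induction d with
  | nil => intro _ hx; simp at hx
  | cons k t ih =>
    intro hnd hx hz
    by_cases hk : k = x
    · subst hk
      have hxt : k ∉ t := (List.nodup_cons.mp hnd).1
      have : (t.map h).sum = 0 := by
        refine List.sum_eq_zero ?_
        intro y hy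
        obtain ⟨j, hj, rfl⟩ := List.mem_map.mp hy
        exact hz j (by simp [hj]) (fun e => hxt (e ▸ hj))
      simp [this]
    · have hxt : x ∈ t := by
        rcases List.mem_cons.mp hx with rfl | hxt
        · exact absurd rfl hk
        · exact hxt
      have hk0 : h k = 0 := hz k (by simp) hk
      have := ih (List.nodup_cons.mp hnd).2 hxt (fun j hj => hz j (by simp [hj]))
      simp [hk0, this]

lemma pvSumCnt (p : List Char → Bool) :
    ∀ (xs : List (List Char)) (d : List (List Char)), d.Nodup → (∀ x ∈ xs, x ∈ d) →
      (d.map (fun k => if p k then (xs.count k : Int) else 0)).sum = (xs.countP p : Int) := by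
  intro xs
  induction xs with
  | nil =>
    intro d _ _
    simp [List.sum_eq_zero]
  | cons x xs ih =>
    intro d hnd hcov
    have hsplit : ∀ k : List Char,
        (if p k then (((x :: xs).count k : Nat) : Int) else 0)
          = (if p k then ((xs.count k : Nat) : Int) else 0)
            + (if p k ∧ k = x then 1 else 0) := by
      intro k
      by_cases hp : p k
      · by_cases hk : k = x
        · subst hk; simp [hp, List.count_cons_self]
        · have hcc : (x :: xs).count k = xs.count k := by
            simp [Ne.symm hk]
          simp [hp, hk, hcc]
      · simp [hp]
    have hadd : (d.map (fun k => if p k then (((x :: xs).count k : Nat) : Int) else 0)).sum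
        = (d.map (fun k => if p k then ((xs.count k : Nat) : Int) else 0)).sum
          + (d.map (fun k => if p k ∧ k = x then (1 : Int) else 0)).sum := by
      have : ∀ d' : List (List Char),
          (d'.map (fun k => if p k then (((x :: xs).count k : Nat) : Int) else 0)).sum
            = (d'.map (fun k => if p k then ((xs.count k : Nat) : Int) else 0)).sum
              + (d'.map (fun k => if p k ∧ k = x then (1 : Int) else 0)).sum := by
        intro d'
        induction d' with
        | nil => simp
        | cons j t iht => simp only [List.map_cons, List.sum_cons, iht, hsplit j]; ring
      exact this d
    have hone : (d.map (fun k => if p k ∧ k = x then (1 : Int) else 0)).sum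
        = (if p x then (1 : Int) else 0) := by
      have := pvSumSingle x (fun k => if p k ∧ k = x then (1 : Int) else 0) d hnd
        (hcov x (by simp)) (fun k _ hk => by simp [hk])
      simpa using this
    rw [hadd, ih d hnd (fun y hy => hcov y (by simp [hy])), hone, List.countP_cons]
    by_cases hp : p x <;> simp [hp]

-- B's group sum is the same count of kept words
lemma pvSumEq (K : Int) (inp : List String) (chosen : PySem.Set Char) :
    teachAltSum (PySem.Dict.counter (pvKeys K inp)) chosen = pvCnt K inp chosen := by
  unfold teachAltSum
  have hstep : (fun (acc : Int) (kv : List Char × Int) =>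
        if kv.1.all (fun c => PySem.Set.contains chosen c) then acc + kv.2 else acc)
      = fun (acc : Int) (kv : List Char × Int) =>
        acc + (if kv.1.all (fun c => PySem.Set.contains chosen c) then kv.2 else 0) := by
    funext acc kv
    split <;> simp
  rw [hstep, PySem.List.foldl_add, PySem.Dict.items_counter, List.map_map]
  have hcomp : ((fun kv : List Char × Int =>
        if kv.1.all (fun c => PySem.Set.contains chosen c) then kv.2 else 0)
        ∘ fun k => (k, ((pvKeys K inp).count k : Int)))
      = fun k : List Char =>
        if k.all (fun c => PySem.Set.contains chosen c) then (((pvKeys K inp).count k : Nat) : Int) else 0 := by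
    funext k; rfl
  rw [hcomp,
    pvSumCnt (fun k => k.all (fun c => PySem.Set.contains chosen c)) (pvKeys K inp)
      (PySem.Set.ofList (pvKeys K inp)) (PySem.Set.nodup_ofList _)
      (fun x hx => (PySem.Set.mem_ofList _ _).mpr hx)]
  unfold pvKeys pvCnt
  rw [List.countP_map]
  have hcg : List.countP
        ((fun k : List Char => k.all fun c => PySem.Set.contains chosen c)
          ∘ fun v => PySem.List.sorted v (fun c => c) false) (pvWs K inp)
      = List.countP (fun w => decide (∀ a ∈ w, a ∈ chosen)) (pvWs K inp) := by
    refine List.countP_congr ?_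
    intro w _
    simp only [Function.comp, decide_eq_true_eq, List.all_eq_true, PySem.List.mem_sorted,
      PySem.Set.contains_iff]
  rw [hcg]
  ring

lemma pvSumNonneg (K : Int) (inp : List String) (chosen : PySem.Set Char) :
    0 ≤ teachAltSum (PySem.Dict.counter (pvKeys K inp)) chosen := by
  rw [pvSumEq]; exact Int.natCast_nonneg _

lemma pvMA_append (f : List Char → Int) (A B : List (List Char)) :
    pvMA f (A ++ B) = max (pvMA f A) (pvMA f B) := by
  unfold pvMA
  rw [List.map_append, List.foldl_append]
  have h0 : (0 : Int) ≤ (A.map f).foldl max 0 := (PySem.List.le_foldl_max (A.map f) 0).1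
  calc (B.map f).foldl max ((A.map f).foldl max 0)
      = (B.map f).foldl max (max ((A.map f).foldl max 0) 0) := by rw [max_eq_left h0]
    _ = max ((A.map f).foldl max 0) ((B.map f).foldl max 0) := pvFoldlMaxShift _ _ _

-- B's choose/skip recursion computes the max over combinations
lemma pvBest (groups : PySem.Dict (List Char) Int)
    (h0 : ∀ ch : PySem.Set Char, 0 ≤ teachAltSum groups ch) :
    ∀ (rest : List Char) (chosen : PySem.Set Char) (r : Nat),
      teachAltBest groups rest chosen r
        = pvMA (fun c => teachAltSum groups (PySem.Set.update chosen c))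
            (PySem.List.combinations rest r) := by
  intro rest
  induction rest with
  | nil =>
    intro chosen r
    match r with
    | 0 =>
      simp only [teachAltBest, PySem.List.combinations_zero]
      unfold pvMA
      simp [PySem.Set.update_nil, max_eq_right (h0 chosen)]
    | r + 1 =>
      simp only [teachAltBest, PySem.List.combinations_nil_succ]
      unfold pvMA
      simp
  | cons x rest ih =>
    intro chosen r
    match r with
    | 0 =>
      simp only [teachAltBest, PySem.List.combinations_zero]
      unfold pvMA
      simp [PySem.Set.update_nil, max_eq_right (h0 chosen)]
    | r + 1 =>
      by_cases hlt : rest.length + 1 < r + 1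
      · simp only [teachAltBest, if_pos hlt]
        rw [PySem.List.combinations_eq_nil_of_length_lt (x :: rest) (by simp only [List.length_cons]; omega)]
        unfold pvMA
        simp
      · simp only [teachAltBest, if_neg hlt]
        rw [PySem.List.combinations_cons_succ, pvMA_append]
        have hmap : pvMA (fun c => teachAltSum groups (chosen.update c))
              ((PySem.List.combinations rest r).map (x :: ·))
            = pvMA (fun c => teachAltSum groups ((chosen.add x).update c))
              (PySem.List.combinations rest r) := by
          unfold pvMA
          rw [List.map_map]
          have hfun : ((fun c => teachAltSum groups (chosen.update c)) ∘ (x :: ·))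
              = fun c : List Char => teachAltSum groups ((chosen.add x).update c) := by
            funext c
            simp [Function.comp, PySem.Set.update_cons]
          rw [hfun]
        rw [hmap, ← ih (chosen.add x) r, ← ih chosen (r + 1)]

-- pvCnt only depends on the members of chosen
lemma pvCntExt (K : Int) (inp : List String) (c d : List Char)
    (h : ∀ a, a ∈ c ↔ a ∈ d) : pvCnt K inp c = pvCnt K inp d := by
  unfold pvCnt
  have hcp : (pvWs K inp).countP (fun w => decide (∀ a ∈ w, a ∈ c))
      = (pvWs K inp).countP (fun w => decide (∀ a ∈ w, a ∈ d)) := by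
    refine List.countP_congr ?_
    intro w _
    simp only [decide_eq_true_eq]
    exact forall₂_congr (fun a _ => h a)
  rw [hcp]

-- ===== VERDICT (by name: the statement is the Claim_ definition above) =====
theorem teach_spec : Claim_equal_teach := by
  intro N K inp _
  show teach N K inp = teach_alt N K inp
  by_cases hK : K < 5
  · simp [teach, teach_alt, hK]
  · simp only [teach, teach_alt, if_neg hK]
    rw [pvAfoldGen K inp [] PySem.Set.empty]
    simp only [List.nil_append]
    rw [show List.foldl PySem.Set.union PySem.Set.empty (pvWs K inp) = pvU K inp from rfl]
    have hkeys : List.map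
        (fun w => PySem.List.sorted
          ((PySem.Set.ofList w.toList).diff (PySem.Set.ofList ['a', 'n', 't', 'c', 'i']))
          (fun c => c) false)
        (List.filter
          (fun w => decide
            ((List.length ((PySem.Set.ofList w.toList).diff (PySem.Set.ofList ['a', 'n', 't', 'c', 'i'])) : Int) ≤ K - 5))
          inp) = pvKeys K inp := by
      unfold pvKeys pvWs pvEx
      rw [List.map_map]
      rfl
    rw [hkeys]
    set Ltr := PySem.List.sorted
      (PySem.Set.ofList (((PySem.Dict.counter (pvKeys K inp)).keys).flatMap (fun k => k)))
      (fun c : Char => c) false with hLtr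
    rw [pvBest _ (pvSumNonneg K inp)]
    simp only [PySem.Set.update_empty, pvSumEq]
    simp only [pvInner]
    rw [pvFoldMaxComm]
    have hmem : ∀ a : Char, a ∈ Ltr ↔ a ∈ pvU K inp := by
      intro a
      rw [hLtr]
      simp only [PySem.List.mem_sorted, PySem.Set.mem_ofList, List.mem_flatMap,
        PySem.Dict.keys_counter, pvKeys, List.mem_map, pvU, pvMemFoldUnion]
      constructor
      · rintro ⟨k, ⟨w, hw, rfl⟩, ha⟩
        exact Or.inr ⟨w, hw, (PySem.List.mem_sorted _ _ _ _).mp ha⟩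
      · rintro (h | ⟨w, hw, ha⟩)
        · simp at h
        · exact ⟨_, ⟨w, hw, rfl⟩, (PySem.List.mem_sorted _ _ _ _).mpr ha⟩
    have hnodL : Ltr.Nodup := by
      rw [hLtr]
      exact (PySem.List.sorted_perm _ _ _).nodup_iff.mpr (PySem.Set.nodup_ofList _)
    have hnodU : (pvU K inp).Nodup := pvNodupFoldUnion _ _ List.nodup_nil
    have hlen : Ltr.length = (pvU K inp).length :=
      ((List.perm_ext_iff_of_nodup hnodL hnodU).mpr hmem).length_eq
    have hfB : (fun c : List Char => pvCnt K inp (PySem.Set.ofList c))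
        = fun c : List Char => pvCnt K inp c :=
      funext fun c => pvCntExt K inp _ c (fun a => PySem.Set.mem_ofList _ _)
    rw [hfB, hlen]
    exact pvMA_comb_perm (pvCnt K inp) (fun c d h => pvCntExt K inp c d h)
      (pvU K inp) Ltr hnodU hnodL (fun a => (hmem a).symm) _
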